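-- pv_equiv track=rewrite | github.com/lunathanael/racing | utils/process.py | prune_branches
-- ===== SOURCE A (Python) =====
-- MAX_DIST_FOR_NEIGHBOR = 20
--
-- def get_nbrs(p, pts):
--     x, y = p
--     max_dist = MAX_DIST_FOR_NEIGHBOR
--     for i in range(1, max_dist):
--         ls = [
--             (x + dx, y + dy)
--             for dx in (-i, 0, i)
--             for dy in (-i, 0, i)
--             if (dx, dy) != (0, 0) and (x + dx, y + dy) in pts
--         ]
--         if ls:
--             return ls
--     return []
--
-- def prune_branches(pts: set, min_branch: int = 15) -> set:
--     pts = set(pts)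
--     for _ in range(min_branch * 3):
--         dead = [p for p in pts if len(get_nbrs(p, pts)) <= 1]
--         if not dead:
--             break
--         pts -= set(dead)
--     return pts
-- ===== SOURCE B (Python) =====
-- MAX_DIST_FOR_NEIGHBOR = 20
--
-- _OFFSETS = [(dx, dy)
--             for i in range(1, MAX_DIST_FOR_NEIGHBOR)
--             for dx in (-i, 0, i)
--             for dy in (-i, 0, i)
--             if (dx, dy) != (0, 0)]
--
--
-- def _is_leaf(p, cur):
--     x, y = p
--     for i in range(1, MAX_DIST_FOR_NEIGHBOR):
--         cnt = 0
--         for dx in (-i, 0, i):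
--             for dy in (-i, 0, i):
--                 if (dx, dy) != (0, 0) and (x + dx, y + dy) in cur:
--                     cnt += 1
--         if cnt:
--             return cnt <= 1
--     return True
--
--
-- def prune_branches(pts: set, min_branch: int = 15) -> set:
--     cur = set(pts)
--     frontier = set(cur)
--     for _ in range(min_branch * 3):
--         dead = {p for p in frontier if p in cur and _is_leaf(p, cur)}
--         if not dead:
--             break
--         cur -= dead
--         frontier = {(qx + dx, qy + dy) for (qx, qy) in dead for (dx, dy) in _OFFSETS}
--     return cur
-- ===== Notes on version B (the rewrite author's own statement) =====
-- stated objective: alternative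
-- what changed: Instead of rescanning every surviving point each round, B keeps a worklist (frontier) of the ring-neighborhood positions of the points removed in the previous round and rechecks only those, with the same round-synchronous removals and the same min_branch*3 round cap; B's leaf test counts ring neighbors instead of materialising A's neighbor list.
import Mathlib
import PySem

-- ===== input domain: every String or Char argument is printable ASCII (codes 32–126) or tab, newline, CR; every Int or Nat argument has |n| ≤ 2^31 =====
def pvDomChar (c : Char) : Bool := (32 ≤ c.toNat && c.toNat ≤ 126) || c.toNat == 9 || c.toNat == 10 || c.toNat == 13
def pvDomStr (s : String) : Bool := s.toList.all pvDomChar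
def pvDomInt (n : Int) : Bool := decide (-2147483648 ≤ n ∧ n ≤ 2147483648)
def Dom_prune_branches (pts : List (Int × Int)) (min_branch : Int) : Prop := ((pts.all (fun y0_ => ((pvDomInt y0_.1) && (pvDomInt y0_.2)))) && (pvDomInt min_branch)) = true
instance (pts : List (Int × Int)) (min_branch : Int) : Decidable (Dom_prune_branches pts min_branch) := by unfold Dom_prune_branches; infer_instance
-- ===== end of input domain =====

-- B replaces A's per-round rescan of every point by a worklist that rechecks only the
-- ring-neighborhood of the points removed in the previous round (same round-synchronous
-- removals, same round cap min_branch*3); return-value equivalence, A mutates nothing.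

-- ===== PORT A =====

-- the ring comprehension: [(x+dx, y+dy) for dx in (-i,0,i) for dy in (-i,0,i) if (dx,dy) != (0,0) and (x+dx,y+dy) in pts]
def pvRing (x y i : Int) (pts : List (Int × Int)) : List (Int × Int) :=
  [-i, 0, i].flatMap (fun dx =>
    (([-i, 0, i].filter (fun dy => decide (¬(dx = 0 ∧ dy = 0) ∧ (x + dx, y + dy) ∈ pts)))).map
      (fun dy => (x + dx, y + dy)))

-- the 'for i in range(1, max_dist): … if ls: return ls' loop of get_nbrs
def pvGetNbrsLoop (x y : Int) (pts : List (Int × Int)) : List Int → List (Int × Int)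
  | [] => []
  | i :: rest =>
    let ls := pvRing x y i pts
    if ls.isEmpty then pvGetNbrsLoop x y pts rest else ls

def pvGetNbrs (p : Int × Int) (pts : List (Int × Int)) : List (Int × Int) :=
  pvGetNbrsLoop p.1 p.2 pts (PySem.List.pyRange 1 20 1)

-- the 'for _ in range(min_branch * 3)' loop of A
def pvLoopA : Nat → PySem.Set (Int × Int) → PySem.Set (Int × Int)
  | 0, s => s
  | n + 1, s =>
    let dead := s.filter (fun p => decide (PySem.List.len (pvGetNbrs p s) ≤ 1))
    if dead.isEmpty then s
    else pvLoopA n (PySem.Set.diff s (PySem.Set.ofList dead))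

def prune_branches (pts : List (Int × Int)) (min_branch : Int) : List (Int × Int) :=
  pvLoopA (min_branch * 3).toNat (PySem.Set.ofList pts)

-- ===== PORT B =====

-- _OFFSETS: all ring offsets for i in 1..19
def pvOffs : List (Int × Int) :=
  (PySem.List.pyRange 1 20 1).flatMap (fun i =>
    [-i, 0, i].flatMap (fun dx =>
      (([-i, 0, i].filter (fun dy => decide (¬(dx = 0 ∧ dy = 0))))).map (fun dy => (dx, dy))))

-- the cnt-accumulating double loop of _is_leaf for one ring i
def pvRingCount (x y i : Int) (cur : List (Int × Int)) : Nat :=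
  [-i, 0, i].foldl (fun c dx =>
    [-i, 0, i].foldl (fun c dy =>
      if decide (¬(dx = 0 ∧ dy = 0) ∧ (x + dx, y + dy) ∈ cur) then c + 1 else c) c) 0

-- the 'for i in range(1, MAX_DIST_FOR_NEIGHBOR)' loop of _is_leaf
def pvIsLeafLoop (x y : Int) (cur : List (Int × Int)) : List Int → Bool
  | [] => true
  | i :: rest =>
    let cnt := pvRingCount x y i cur
    if cnt ≠ 0 then decide (cnt ≤ 1) else pvIsLeafLoop x y cur rest

def pvIsLeaf (p : Int × Int) (cur : List (Int × Int)) : Bool :=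
  pvIsLeafLoop p.1 p.2 cur (PySem.List.pyRange 1 20 1)

-- frontier = {(qx+dx, qy+dy) for (qx,qy) in dead for (dx,dy) in _OFFSETS}
def pvAffected (dead : List (Int × Int)) : PySem.Set (Int × Int) :=
  PySem.Set.ofList (dead.flatMap (fun q => pvOffs.map (fun o => (q.1 + o.1, q.2 + o.2))))

-- the 'for _ in range(min_branch * 3)' loop of B, carrying the frontier
def pvLoopB : Nat → PySem.Set (Int × Int) → PySem.Set (Int × Int) → PySem.Set (Int × Int)
  | 0, cur, _ => cur
  | n + 1, cur, fr =>
    let dead := fr.filter (fun p => decide (p ∈ cur) && pvIsLeaf p cur)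
    if dead.isEmpty then cur
    else pvLoopB n (PySem.Set.diff cur dead) (pvAffected dead)

def prune_branches_alt (pts : List (Int × Int)) (min_branch : Int) : List (Int × Int) :=
  let cur := PySem.Set.ofList pts
  pvLoopB (min_branch * 3).toNat cur cur

-- ===== PRECONDITION & SPEC =====
def Spec_prune_branches (pts : List (Int × Int)) (min_branch : Int) (out : List (Int × Int)) : Prop := out = prune_branches_alt pts min_branch
instance (pts : List (Int × Int)) (min_branch : Int) (out : List (Int × Int)) : Decidable (Spec_prune_branches pts min_branch out) := by unfold Spec_prune_branches; infer_instance

-- ===== CLAIM (what is proved, stated in full; the proofs are below) =====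
def Claim_equal_prune_branches : Prop := ∀ (pts : List (Int × Int)) (min_branch : Int), Dom_prune_branches pts min_branch → Spec_prune_branches pts min_branch (prune_branches pts min_branch)

-- ===== LEMMAS AND PROOFS =====

-- counting fold over a 3-element list is the filtered length
theorem pvCount3 (P : Int → Bool) (c : Nat) (a b d : Int) :
    List.foldl (fun c x => if P x then c + 1 else c) c [a, b, d]
      = c + ([a, b, d].filter P).length := by
  cases ha : P a <;> cases hb : P b <;> cases hd : P d <;>
    simp [List.foldl, List.filter, ha, hb, hd]

-- B's ring count is the length of A's ring list
theorem pvRingCount_eq (x y i : Int) (s : List (Int × Int)) :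
    pvRingCount x y i s = (pvRing x y i s).length := by
  simp only [pvRingCount, pvCount3]
  simp only [pvRing, List.foldl_cons, List.foldl_nil, List.flatMap_cons, List.flatMap_nil,
    List.length_append, List.length_map, List.length_nil]
  omega

-- B's leaf test agrees with A's 'len(get_nbrs(p, pts)) <= 1' (on any ring index list)
theorem pvIsLeafLoop_eq (x y : Int) (s : List (Int × Int)) (l : List Int) :
    pvIsLeafLoop x y s l = decide ((pvGetNbrsLoop x y s l).length ≤ 1) := by
  induction l with
  | nil => simp [pvIsLeafLoop, pvGetNbrsLoop]
  | cons i rest ih =>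
    simp only [pvIsLeafLoop, pvGetNbrsLoop, pvRingCount_eq]
    by_cases h : pvRing x y i s = []
    · simp [h, ih]
    · have hlen : (pvRing x y i s).length ≠ 0 := fun hh => h (List.length_eq_zero_iff.mp hh)
      simp [List.isEmpty_iff, h, hlen]

theorem pvIsLeaf_eq (p : Int × Int) (s : List (Int × Int)) :
    pvIsLeaf p s = decide (PySem.List.len (pvGetNbrs p s) ≤ 1) := by
  simp [pvIsLeaf, pvGetNbrs, pvIsLeafLoop_eq, PySem.List.len_eq]

-- membership characterisation of the offset table
theorem mem_pvOffs (dx dy : Int) :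
    (dx, dy) ∈ pvOffs ↔
      ∃ i : Int, (1 ≤ i ∧ i < 20) ∧ (dx = -i ∨ dx = 0 ∨ dx = i) ∧
        (dy = -i ∨ dy = 0 ∨ dy = i) ∧ ¬(dx = 0 ∧ dy = 0) := by
  simp only [pvOffs, List.mem_flatMap, List.mem_map, List.mem_filter,
    PySem.List.mem_pyRange_one, List.mem_cons, List.not_mem_nil, or_false]
  constructor
  · rintro ⟨i, hi, dx', hdx', dy', ⟨hdy', hc⟩, h⟩
    obtain ⟨h1, h2⟩ := Prod.mk.injEq .. ▸ h
    subst h1; subst h2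
    refine ⟨i, hi, hdx', hdy', ?_⟩
    revert hc; simp; tauto
  · rintro ⟨i, hi, hdx, hdy, hc⟩
    refine ⟨i, hi, dx, hdx, dy, ⟨hdy, ?_⟩, rfl⟩
    simp; tauto

theorem neg_mem_pvOffs {dx dy : Int} (h : (dx, dy) ∈ pvOffs) : (-dx, -dy) ∈ pvOffs := by
  rw [mem_pvOffs] at h ⊢
  obtain ⟨i, hi, hdx, hdy, hc⟩ := h
  exact ⟨i, hi, by omega, by omega, by omega⟩

-- membership characterisation of the frontier built from the removed points
theorem mem_pvAffected (dead : List (Int × Int)) (v : Int × Int) :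
    v ∈ pvAffected dead ↔ ∃ q ∈ dead, ∃ o ∈ pvOffs, v = (q.1 + o.1, q.2 + o.2) := by
  simp [pvAffected, PySem.Set.mem_ofList, List.mem_flatMap, List.mem_map, eq_comm]

-- get_nbrs only inspects membership of the ring positions p + o, o ∈ pvOffs
theorem pvRing_congr (x y i : Int) (s t : List (Int × Int))
    (H : ∀ o ∈ pvOffs, ((x + o.1, y + o.2) ∈ s ↔ (x + o.1, y + o.2) ∈ t))
    (hi : 1 ≤ i ∧ i < 20) : pvRing x y i s = pvRing x y i t := by
  have key : ∀ dx dy : Int, (dx = -i ∨ dx = 0 ∨ dx = i) → (dy = -i ∨ dy = 0 ∨ dy = i) →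
      (decide (¬(dx = 0 ∧ dy = 0) ∧ (x + dx, y + dy) ∈ s))
        = (decide (¬(dx = 0 ∧ dy = 0) ∧ (x + dx, y + dy) ∈ t)) := by
    intro dx dy hdx hdy
    by_cases hz : dx = 0 ∧ dy = 0
    · simp [hz]
    · have ho : (dx, dy) ∈ pvOffs := (mem_pvOffs dx dy).mpr ⟨i, hi, hdx, hdy, hz⟩
      have hm := H (dx, dy) ho
      simp only [decide_eq_decide]
      constructor <;> rintro ⟨h1, h2⟩ <;> exact ⟨h1, by tauto⟩
  simp only [pvRing]
  apply List.flatMap_congr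
  intro dx hdx
  have hf : List.filter (fun dy => decide (¬(dx = 0 ∧ dy = 0) ∧ (x + dx, y + dy) ∈ s)) [-i, 0, i]
      = List.filter (fun dy => decide (¬(dx = 0 ∧ dy = 0) ∧ (x + dx, y + dy) ∈ t)) [-i, 0, i] := by
    apply List.filter_congr
    intro dy hdy
    exact key dx dy (by simpa using hdx) (by simpa using hdy)
  rw [hf]

theorem pvGetNbrsLoop_congr (x y : Int) (s t : List (Int × Int)) (l : List Int)
    (H : ∀ o ∈ pvOffs, ((x + o.1, y + o.2) ∈ s ↔ (x + o.1, y + o.2) ∈ t))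
    (hl : ∀ i ∈ l, 1 ≤ i ∧ i < 20) :
    pvGetNbrsLoop x y s l = pvGetNbrsLoop x y t l := by
  induction l with
  | nil => rfl
  | cons i rest ih =>
    have hr := pvRing_congr x y i s t H (hl i (by simp))
    simp only [pvGetNbrsLoop, hr]
    split
    · exact ih (fun j hj => hl j (by simp [hj]))
    · rfl

theorem pvGetNbrs_congr (p : Int × Int) (s t : List (Int × Int))
    (H : ∀ o ∈ pvOffs, ((p.1 + o.1, p.2 + o.2) ∈ s ↔ (p.1 + o.1, p.2 + o.2) ∈ t)) :
    pvGetNbrs p s = pvGetNbrs p t := by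
  exact pvGetNbrsLoop_congr p.1 p.2 s t _ H
    (fun i hi => by simpa [PySem.List.mem_pyRange_one] using hi)

-- main loop correspondence: if the frontier contains every current leaf, B's rounds = A's rounds
theorem pvLoopB_eq_pvLoopA (n : Nat) : ∀ (s fr : List (Int × Int)),
    (∀ p ∈ s, PySem.List.len (pvGetNbrs p s) ≤ 1 → p ∈ fr) →
    pvLoopB n s fr = pvLoopA n s := by
  induction n with
  | zero => intro s fr _; rfl
  | succ n ih =>
    intro s fr hfr
    simp only [pvLoopA, pvLoopB]
    set deadA := s.filter (fun p => decide (PySem.List.len (pvGetNbrs p s) ≤ 1)) with hA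
    set deadB := fr.filter (fun p => decide (p ∈ s) && pvIsLeaf p s) with hB
    have hmem : ∀ v, v ∈ deadB ↔ v ∈ deadA := by
      intro v
      simp only [hA, hB, List.mem_filter, pvIsLeaf_eq, Bool.and_eq_true, decide_eq_true_eq]
      constructor
      · rintro ⟨_, hv, hl⟩; exact ⟨hv, hl⟩
      · rintro ⟨hv, hl⟩; exact ⟨hfr v hv hl, hv, hl⟩
    have hempty : deadB.isEmpty = deadA.isEmpty := by
      by_cases h : deadA = []
      · have hBn : deadB = [] := List.eq_nil_iff_forall_not_mem.mpr
          (fun v hv => List.eq_nil_iff_forall_not_mem.mp h v ((hmem v).mp hv))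
        rw [h, hBn]
      · obtain ⟨v, hv⟩ := List.exists_mem_of_ne_nil deadA h
        have hBn : deadB ≠ [] := List.ne_nil_of_mem ((hmem v).mpr hv)
        rw [List.isEmpty_eq_false_iff.mpr h, List.isEmpty_eq_false_iff.mpr hBn]
    rw [hempty]
    split
    · rfl
    · have hdiff : PySem.Set.diff s deadB = PySem.Set.diff s (PySem.Set.ofList deadA) := by
        show s.filter _ = s.filter _
        apply List.filter_congr
        intro v _
        by_cases h : v ∈ deadA
        · have h1 : v ∈ deadB := (hmem v).mpr h
          have h2 : v ∈ PySem.Set.ofList deadA := (PySem.Set.mem_ofList _ _).mpr h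
          simp [PySem.Set.contains_eq_listContains, h1, h2]
        · have h1 : v ∉ deadB := (hmem v).not.mpr h
          have h2 : v ∉ PySem.Set.ofList deadA := fun hh => h ((PySem.Set.mem_ofList _ _).mp hh)
          simp [PySem.Set.contains_eq_listContains, h1, h2]
      rw [hdiff]
      apply ih
      -- the new frontier contains every leaf of the shrunk set
      intro p hp hleaf
      set s' := PySem.Set.diff s (PySem.Set.ofList deadA) with hs'
      have hps : p ∈ s ∧ p ∉ deadA := by
        have := (PySem.Set.mem_diff s (PySem.Set.ofList deadA) p).mp hp
        exact ⟨this.1, fun hh => this.2 ((PySem.Set.mem_ofList _ _).mpr hh)⟩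
      by_contra hnf
      -- p not in the frontier ⇒ no removed point sits at any ring offset of p
      have hnodead : ∀ o ∈ pvOffs, (p.1 + o.1, p.2 + o.2) ∉ deadA := by
        intro o ho hq
        apply hnf
        rw [mem_pvAffected]
        refine ⟨(p.1 + o.1, p.2 + o.2), (hmem _).mpr hq, (-o.1, -o.2),
          neg_mem_pvOffs ho, ?_⟩
        simp
      have hcong : pvGetNbrs p s' = pvGetNbrs p s := by
        apply pvGetNbrs_congr
        intro o ho
        rw [hs', PySem.Set.mem_diff, PySem.Set.mem_ofList]
        exact ⟨fun h => h.1, fun h => ⟨h, hnodead o ho⟩⟩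
      rw [hcong] at hleaf
      refine hps.2 ?_
      have hl : ((pvGetNbrs p s).length : Int) ≤ 1 := by
        simpa [PySem.List.len_eq] using hleaf
      simp only [hA, List.mem_filter, PySem.List.len_eq, decide_eq_true_eq]
      exact ⟨hps.1, by exact_mod_cast hl⟩

-- ===== VERDICT (by name: the statement is the Claim_ definition above) =====
theorem prune_branches_spec : Claim_equal_prune_branches := by
  intro pts min_branch _
  unfold Spec_prune_branches prune_branches prune_branches_alt
  exact (pvLoopB_eq_pvLoopA _ _ _ (fun p hp _ => hp)).symm
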